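-- pv_equiv track=rewrite | github.com/SangwonYoon/algorithm_py | self/0만들기.py | base_3
-- ===== SOURCE A (Python) =====
-- def base_3(n):
--     for i in range(len(n)-1, -1, -1):
--         if n[i] + 1 == 3:
--             n[i] = 0
--         else:
--             n[i] += 1
--             break
--     return n
-- ===== SOURCE B (Python) =====
-- def base_3(n):
--     # single forward pass: remember the LAST index whose digit does not carry
--     # (x + 1 != 3); everything after it carries and becomes 0.
--     # (A mutates its argument in place; B is non-destructive: return value only.)
--     last = -1
--     for i, x in enumerate(n):
--         if x + 1 != 3:
--             last = i
--     if last == -1: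
--         return [0] * len(n)
--     return n[:last] + [n[last] + 1] + [0] * (len(n) - 1 - last)
-- ===== Notes on version B (the rewrite author's own statement) =====
-- stated objective: alternative
-- what changed: A walks indices backwards mutating the list in place and breaking at the first non-carrying digit; B makes one FORWARD pass over enumerate(n) keeping the last index whose digit does not carry, then rebuilds the result non-destructively from a slice, the bumped digit and a zero block (A mutates its argument, B does not; the equivalence is about the return value).
import Mathlib
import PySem

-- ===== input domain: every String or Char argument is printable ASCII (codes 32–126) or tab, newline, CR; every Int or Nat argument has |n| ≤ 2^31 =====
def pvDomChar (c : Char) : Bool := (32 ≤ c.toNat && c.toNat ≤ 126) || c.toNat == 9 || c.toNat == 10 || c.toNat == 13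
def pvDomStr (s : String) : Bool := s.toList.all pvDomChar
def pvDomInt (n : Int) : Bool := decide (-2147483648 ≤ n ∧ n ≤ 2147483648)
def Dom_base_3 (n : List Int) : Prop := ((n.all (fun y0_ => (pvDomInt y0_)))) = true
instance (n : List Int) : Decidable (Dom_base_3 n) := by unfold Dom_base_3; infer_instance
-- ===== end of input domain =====

-- B replaces A's backward in-place mutation loop by a single FORWARD pass that records the
-- last non-carrying index and then rebuilds the result non-destructively;
-- A mutates its argument in place, B does not — the claim is about the RETURN value only.

-- ===== PORT A =====
-- the for-loop over range(len(n)-1, -1, -1) with the in-place writes and the break;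
-- pyGetD/pySetD are exact here since every visited index is in range
def base_3_loopA : List Int → List Int → List Int
  | acc, [] => acc
  | acc, i :: rest =>
    if PySem.List.pyGetD acc i 0 + 1 == 3 then
      base_3_loopA (PySem.List.pySetD acc i 0) rest
    else
      PySem.List.pySetD acc i (PySem.List.pyGetD acc i 0 + 1)   -- break: return after this write

def base_3 (n : List Int) : List Int :=
  base_3_loopA n (PySem.List.pyRange ((n.length : Int) - 1) (-1) (-1))

-- ===== PORT B =====
-- 'for i, x in enumerate(n): if x + 1 != 3: last = i' — a forward fold keeping the last
-- non-carrying index, then the rebuild from a slice and a zero block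
def base_3_alt (n : List Int) : List Int :=
  let last := (PySem.List.enumerate n).foldl
    (fun acc p => if p.2 + 1 ≠ 3 then p.1 else acc) (-1)
  if last = -1 then List.replicate n.length 0
  else PySem.List.slice n none (some last) ++ [PySem.List.pyGetD n last 0 + 1]
       ++ List.replicate ((n.length : Int) - 1 - last).toNat 0

-- ===== PRECONDITION & SPEC =====
def Spec_base_3 (n : List Int) (out : List Int) : Prop := out = base_3_alt n
instance (n : List Int) (out : List Int) : Decidable (Spec_base_3 n out) := by unfold Spec_base_3; infer_instance

-- ===== CLAIM (what is proved, stated in full; the proofs are below) =====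
def Claim_equal_base_3 : Prop := ∀ (n : List Int), Dom_base_3 n → Spec_base_3 n (base_3 n)

-- ===== LEMMAS AND PROOFS =====

-- proof-side characterisation: first index i from the end with n[i] + 1 ≠ 3, or -1; fuel = i + 1
def pvScan (n : List Int) : Nat → Int
  | 0 => -1
  | m + 1 =>
    if PySem.List.pyGetD n (m : Int) 0 + 1 == 3 then pvScan n m else (m : Int)

-- pvScan only looks at indices < m, so appending on the right does not change it
lemma pvScan_append (n : List Int) (x : Int) :
    ∀ m : Nat, m ≤ n.length → pvScan (n ++ [x]) m = pvScan n m := by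
  intro m
  induction m with
  | zero => intro _; rfl
  | succ m ih =>
    intro hm
    have hm' : m < n.length := by omega
    have hg : PySem.List.pyGetD (n ++ [x]) ((m : Nat) : Int) 0 =
        PySem.List.pyGetD n ((m : Nat) : Int) 0 := by
      rw [PySem.List.pyGetD_natCast, PySem.List.pyGetD_natCast]
      simp [List.getD_eq_getElem?_getD, List.getElem?_append_left hm']
    simp only [pvScan, hg, ih (by omega)]

-- BRIDGE: B's forward fold computes the same index as the reverse characterisation
lemma pv_fold_eq_scan (n : List Int) :
    (PySem.List.enumerate n).foldl (fun acc p => if p.2 + 1 ≠ 3 then p.1 else acc) (-1)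
      = pvScan n n.length := by
  induction n using List.reverseRecOn with
  | nil => simp [PySem.List.enumerate, pvScan]
  | append_singleton n x ih =>
    rw [PySem.List.enumerate_append]
    rw [List.foldl_append]
    have hx : PySem.List.pyGetD (n ++ [x]) ((n.length : Nat) : Int) 0 = x := by
      rw [PySem.List.pyGetD_natCast]
      simp [List.getD_eq_getElem?_getD]
    have hlen : (n ++ [x]).length = n.length + 1 := by simp
    rw [hlen]
    simp only [pvScan, hx, PySem.List.enumerate, List.foldl_cons, List.foldl_nil]
    rw [pvScan_append n x n.length le_rfl]
    by_cases hc : x + 1 = 3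
    · simpa [hc] using ih
    · simp [hc]

-- Zs n m: n with every position ≥ m zeroed — the loop state of A after processing indices m..len-1 without a break
def pvZs (n : List Int) (m : Nat) : List Int := n.take m ++ List.replicate (n.length - m) 0

lemma pvZs_zero (n : List Int) : pvZs n 0 = List.replicate n.length 0 := by
  simp [pvZs]

lemma pvZs_len (n : List Int) : pvZs n n.length = n := by
  simp [pvZs]

lemma pvZs_succ (n : List Int) (m : Nat) (hm : m < n.length) :
    pvZs n (m + 1) = n.take m ++ n[m] :: List.replicate (n.length - (m + 1)) 0 := by
  unfold pvZs
  rw [List.take_add_one, List.getElem?_eq_getElem hm]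
  simp only [Option.toList_some, List.append_assoc, List.singleton_append]

lemma pvZs_getD (n : List Int) (m : Nat) (hm : m < n.length) :
    (pvZs n (m + 1)).getD m 0 = n[m] := by
  rw [pvZs_succ n m hm]
  rw [List.getD_eq_getElem?_getD, List.getElem?_append_right (by simp [hm.le])]
  simp [hm.le]

lemma pvZs_set (n : List Int) (m : Nat) (hm : m < n.length) (v : Int) :
    (pvZs n (m + 1)).set m v = n.take m ++ v :: List.replicate (n.length - (m + 1)) 0 := by
  rw [pvZs_succ n m hm]
  rw [List.set_append_right _ _ (by simp [hm.le])]
  simp [hm.le]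

-- the main loop invariant: A's loop started on state pvZs n m over indices m-1..0
-- computes exactly what B builds from pvScan n m
lemma pv_main (n : List Int) : ∀ m : Nat, m ≤ n.length →
    base_3_loopA (pvZs n m) (PySem.List.pyRange ((m : Int) - 1) (-1) (-1)) =
      (if pvScan n m = -1 then List.replicate n.length 0
       else PySem.List.slice n none (some (pvScan n m))
            ++ [PySem.List.pyGetD n (pvScan n m) 0 + 1]
            ++ List.replicate ((n.length : Int) - 1 - pvScan n m).toNat 0) := by
  intro m
  induction m with
  | zero =>
    intro _
    rw [PySem.List.pyRange_neg_one_eq_nil (by omega)]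
    simp [base_3_loopA, pvScan, pvZs_zero]
  | succ m ih =>
    intro hm
    have hm' : m < n.length := by omega
    have hget : n.getD m 0 = n[m] := by
      simp [List.getD_eq_getElem?_getD, List.getElem?_eq_getElem hm']
    have hcast : ((m + 1 : Nat) : Int) - 1 = (m : Int) := by push_cast; ring
    rw [hcast, PySem.List.pyRange_neg_one_cons (by omega)]
    by_cases hc : n[m] + 1 = 3
    · have hscan : pvScan n (m + 1) = pvScan n m := by
        simp [pvScan, List.getD_eq_getElem?_getD, List.getElem?_eq_getElem hm', hc]
      rw [hscan]
      have hstep : ∀ R, base_3_loopA (pvZs n (m + 1)) ((m : Int) :: R) =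
          base_3_loopA (pvZs n m) R := by
        intro R
        simp only [base_3_loopA, PySem.List.pyGetD_natCast, PySem.List.pySetD_natCast,
          pvZs_getD n m hm']
        rw [if_pos (by simp [hc])]
        congr 1
        rw [pvZs_set n m hm' 0]
        have h2 : n.length - m = (n.length - (m + 1)) + 1 := by omega
        simp [pvZs, h2, List.replicate_succ]
      rw [hstep]
      exact ih (by omega)
    · have hscan : pvScan n (m + 1) = (m : Int) := by
        simp [pvScan, List.getD_eq_getElem?_getD, List.getElem?_eq_getElem hm', hc]
      rw [hscan]
      have hstep : ∀ R, base_3_loopA (pvZs n (m + 1)) ((m : Int) :: R) =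
          (pvZs n (m + 1)).set m (n[m] + 1) := by
        intro R
        simp only [base_3_loopA, PySem.List.pyGetD_natCast, PySem.List.pySetD_natCast,
          pvZs_getD n m hm']
        rw [if_neg (by simp [hc])]
      rw [hstep]
      rw [if_neg (by omega), pvZs_set n m hm', PySem.List.slice_to_natCast]
      have h1 : ((n.length : Int) - 1 - (m : Int)).toNat = n.length - (m + 1) := by omega
      rw [h1]
      have hg2 : PySem.List.pyGetD n ((m : Nat) : Int) 0 = n[m] := by
        rw [PySem.List.pyGetD_natCast, hget]
      rw [hg2]
      simp

-- ===== VERDICT (by name: the statement is the Claim_ definition above) =====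
theorem base_3_spec : Claim_equal_base_3 := by
  intro n _
  show base_3 n = base_3_alt n
  have h := pv_main n n.length le_rfl
  rw [pvZs_len] at h
  simp only [base_3, base_3_alt, pv_fold_eq_scan]
  exact h
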